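-- pv_equiv track=rewrite | github.com/isaac-sim/IsaacLab | source/isaaclab_newton/isaaclab_newton/assets/rigid_object_collection/rigid_object_collection.py | _build_combined_pattern
-- ===== SOURCE A (Python) =====
-- def _build_combined_pattern(prim_path_exprs: list[str]) -> str:
--     """Build a single fnmatch pattern that matches all body types.
--
--     Compares path segments across all expressions and wildcards the segments that differ.
--     For example, given::
--
--         ["/World/Env_*/DexCube/Cube", "/World/Env_*/DexSphere/Sphere"]
--
--     produces ``"/World/Env_*/*/*"``.
--
--     Args:
--         prim_path_exprs: List of prim path expressions, one per body type.
--
--     Returns: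
--         A single fnmatch pattern string.
--
--     Raises:
--         ValueError: If the expressions have different numbers of path segments.
--     """
--     if len(prim_path_exprs) == 1:
--         return prim_path_exprs[0]
--
--     split_paths = [p.split("/") for p in prim_path_exprs]
--     lengths = {len(s) for s in split_paths}
--     if len(lengths) != 1:
--         raise ValueError(
--             f"Cannot build combined pattern: path expressions have different segment counts: {prim_path_exprs}"
--         )
--
--     combined_segments = []
--     for segments in zip(*split_paths):
--         unique = set(segments)
--         if len(unique) == 1:
--             combined_segments.append(segments[0])
--         else:
--             combined_segments.append("*")
--     return "/".join(combined_segments)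
-- ===== SOURCE B (Python) =====
-- def _build_combined_pattern(prim_path_exprs: list[str]) -> str:
--     if len(prim_path_exprs) == 1:
--         return prim_path_exprs[0]
--
--     split_paths = [p.split("/") for p in prim_path_exprs]
--     ref = split_paths[0]
--     rest = split_paths[1:]
--     if any(len(s) != len(ref) for s in rest):
--         raise ValueError(
--             f"Cannot build combined pattern: path expressions have different segment counts: {prim_path_exprs}"
--         )
--
--     differing = set()
--     for row in rest:
--         for i in range(len(row)):
--             if row[i] != ref[i]:
--                 differing.add(i)
--     return "/".join("*" if i in differing else ref[i] for i in range(len(ref)))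
-- ===== Notes on version B (the rewrite author's own statement) =====
-- stated objective: alternative
-- what changed: Replaces A's column-wise transpose (zip(*rows)) with a per-column set of all segments by a row-wise scan against the first path as reference, maintaining one set of differing indices, and builds the output from the reference alone; the length check compares each row to the reference instead of building a set of lengths.
import Mathlib
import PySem

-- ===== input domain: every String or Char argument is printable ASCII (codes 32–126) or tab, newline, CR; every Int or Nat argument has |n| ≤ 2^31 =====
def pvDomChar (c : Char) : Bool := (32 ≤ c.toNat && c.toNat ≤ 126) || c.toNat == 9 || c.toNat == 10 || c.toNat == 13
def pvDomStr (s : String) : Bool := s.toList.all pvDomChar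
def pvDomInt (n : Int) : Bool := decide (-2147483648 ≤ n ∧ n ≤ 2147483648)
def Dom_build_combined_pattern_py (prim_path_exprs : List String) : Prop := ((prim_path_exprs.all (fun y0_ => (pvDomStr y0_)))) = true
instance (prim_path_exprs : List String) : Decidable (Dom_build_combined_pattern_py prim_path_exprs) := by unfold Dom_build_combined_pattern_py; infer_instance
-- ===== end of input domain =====

-- B replaces A's column-wise zip(*rows)+per-column-set algorithm by a row-wise scan
-- against the first path, maintaining one set of differing indices (alternative decomposition,
-- same cost). Return-value equivalence only; neither function mutates its argument.

-- ===== PORT A =====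

-- p.split("/"): sep is the nonempty literal "/", so split? is always `some`.
def pvSplit (p : String) : List String := (PySem.Str.split? p "/").getD []

-- zip(*split_paths): columns 0..min(len)-1, each column the i-th element of every row
-- (indices are in range for every row, so getD is exact).
def pvZipStar (rows : List (List String)) : List (List String) :=
  match (rows.map List.length).min? with
  | none => []
  | some n => (List.range n).map (fun i => rows.map (fun r => r.getD i ""))

def build_combined_pattern_py (prim_path_exprs : List String) : String :=
  if prim_path_exprs.length == 1 then prim_path_exprs.headD ""
  else
    let split_paths := prim_path_exprs.map pvSplit
    let lengths : PySem.Set Nat := PySem.Set.ofList (split_paths.map List.length)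
    if lengths.length ≠ 1 then ""  -- raise ValueError: excluded by Pre_
    else
      let combined := (pvZipStar split_paths).foldl
        (fun acc segments =>
          let unique : PySem.Set String := PySem.Set.ofList segments
          if unique.length == 1 then acc ++ [segments.headD ""] else acc ++ ["*"]) []
      PySem.Str.join "/" combined

-- ===== PORT B =====

-- inner loop of B: record the indices where `row` differs from `ref`
-- (i < len(row) = len(ref) when reached, so getD is exact).
def pvRowDiffs (ref row : List String) (d : PySem.Set Nat) : PySem.Set Nat :=
  (List.range row.length).foldl
    (fun d i => if row.getD i "" ≠ ref.getD i "" then PySem.Set.add d i else d) d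

def build_combined_pattern_py_alt (prim_path_exprs : List String) : String :=
  if prim_path_exprs.length == 1 then prim_path_exprs.headD ""
  else
    let split_paths := prim_path_exprs.map pvSplit
    let ref := split_paths.headD []
    let rest := split_paths.tail
    if rest.any (fun s => s.length ≠ ref.length) then ""  -- raise ValueError: excluded by Pre_
    else
      let differing := rest.foldl (fun d row => pvRowDiffs ref row d) PySem.Set.empty
      PySem.Str.join "/" ((List.range ref.length).map
        (fun i => if differing.contains i then "*" else ref.getD i ""))

-- ===== PRECONDITION & SPEC =====
-- Pre_ excludes exactly the inputs on which A raises ValueError: the empty list and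
-- lists whose paths split into different numbers of "/"-separated segments.
def Pre_build_combined_pattern_py (prim_path_exprs : List String) : Prop :=
  prim_path_exprs ≠ [] ∧
  ∀ p ∈ prim_path_exprs, (pvSplit p).length = (pvSplit (prim_path_exprs.headD "")).length
instance (prim_path_exprs : List String) : Decidable (Pre_build_combined_pattern_py prim_path_exprs) := by
  unfold Pre_build_combined_pattern_py; infer_instance

def pvWitness_build_combined_pattern_py : List String :=
  ["/World/Env_*/DexCube/Cube", "/World/Env_*/DexSphere/Sphere"]

def Spec_build_combined_pattern_py (prim_path_exprs : List String) (out : String) : Prop := out = build_combined_pattern_py_alt prim_path_exprs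
instance (prim_path_exprs : List String) (out : String) : Decidable (Spec_build_combined_pattern_py prim_path_exprs out) := by unfold Spec_build_combined_pattern_py; infer_instance

-- ===== CLAIM (what is proved, stated in full; the proofs are below) =====
def Claim_equal_build_combined_pattern_py : Prop := ∀ (prim_path_exprs : List String), Dom_build_combined_pattern_py prim_path_exprs → Pre_build_combined_pattern_py prim_path_exprs → Spec_build_combined_pattern_py prim_path_exprs (build_combined_pattern_py prim_path_exprs)

-- ===== LEMMAS AND PROOFS =====

-- set insertion of already-present elements is the identity
theorem pv_foldl_add_of_mem {α : Type} [BEq α] [LawfulBEq α] (l : List α) (s : PySem.Set α)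
    (h : ∀ y ∈ l, y ∈ s) : l.foldl PySem.Set.add s = s := by
  induction l generalizing s with
  | nil => rfl
  | cons a l ih =>
    have ha : PySem.Set.add s a = s := by
      simp [PySem.Set.add, PySem.Set.contains, h a (by simp)]
    simp only [List.foldl_cons, ha]
    exact ih s (fun y hy => h y (by simp [hy]))

theorem pv_ofList_const {α : Type} [BEq α] [LawfulBEq α] (x : α) (l : List α)
    (h : ∀ y ∈ l, y = x) : PySem.Set.ofList (x :: l) = [x] := by
  have : PySem.Set.ofList (x :: l) = l.foldl PySem.Set.add [x] := by
    simp [PySem.Set.ofList_eq_foldl, PySem.Set.add]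
  rw [this, pv_foldl_add_of_mem]
  intro y hy; simp [h y hy]

theorem pv_ofList_len_one {α : Type} [BEq α] [LawfulBEq α] (x : α) (l : List α) :
    (PySem.Set.ofList (x :: l)).length = 1 ↔ ∀ y ∈ l, y = x := by
  constructor
  · intro h1 y hy
    by_contra hne
    have hx : x ∈ PySem.Set.ofList (x :: l) := by rw [PySem.Set.mem_ofList]; simp
    have hyS : y ∈ PySem.Set.ofList (x :: l) := by rw [PySem.Set.mem_ofList]; simp [hy]
    match hS : PySem.Set.ofList (x :: l) with
    | [] => rw [hS] at hx; simp at hx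
    | [a] =>
      rw [hS] at hx hyS; simp at hx hyS; exact hne (by rw [hyS, hx])
    | a :: b :: rest => rw [hS] at h1; simp at h1
  · intro h; rw [pv_ofList_const x l h]; rfl

theorem pv_min?_const (L : Nat) (l : List Nat) (h : ∀ y ∈ l, y = L) :
    (L :: l).min? = some L := by
  induction l with
  | nil => rfl
  | cons a l ih =>
    have ha : a = L := h a (by simp)
    subst ha
    have ih' := ih (fun y hy => h y (by simp [hy]))
    rw [List.min?_cons, ih']
    simp

theorem pv_foldl_append_ite {α β : Type} (l : List α) (c : α → Prop) [DecidablePred c]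
    (f g : α → β) (a : List β) :
    l.foldl (fun acc x => if c x then acc ++ [f x] else acc ++ [g x]) a
      = a ++ l.map (fun x => if c x then f x else g x) := by
  induction l generalizing a with
  | nil => simp
  | cons x l ih => by_cases hc : c x <;> simp [hc, ih]

theorem pv_mem_foldl_add_if {α β : Type} [BEq α] [LawfulBEq α]
    (l : List β) (p : β → Prop) [DecidablePred p] (g : β → α) (s : PySem.Set α) (x : α) :
    x ∈ l.foldl (fun d y => if p y then PySem.Set.add d (g y) else d) s ↔
      x ∈ s ∨ ∃ y ∈ l, p y ∧ g y = x := by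
  induction l generalizing s with
  | nil => simp
  | cons a l ih =>
    simp only [List.foldl_cons]
    by_cases hp : p a
    · rw [if_pos hp, ih]
      simp only [PySem.Set.mem_add, List.mem_cons]
      constructor
      · rintro ((h|h)|⟨y,hy,hpy,hgy⟩)
        · exact Or.inl h
        · exact Or.inr ⟨a, Or.inl rfl, hp, h.symm⟩
        · exact Or.inr ⟨y, Or.inr hy, hpy, hgy⟩
      · rintro (h|⟨y,(rfl|hy),hpy,hgy⟩)
        · exact Or.inl (Or.inl h)
        · exact Or.inl (Or.inr hgy.symm)
        · exact Or.inr ⟨y, hy, hpy, hgy⟩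
    · rw [if_neg hp, ih]
      simp only [List.mem_cons]
      constructor
      · rintro (h|⟨y,hy,hpy,hgy⟩)
        · exact Or.inl h
        · exact Or.inr ⟨y, Or.inr hy, hpy, hgy⟩
      · rintro (h|⟨y,(rfl|hy),hpy,hgy⟩)
        · exact Or.inl h
        · exact absurd hpy hp
        · exact Or.inr ⟨y, hy, hpy, hgy⟩

theorem pv_mem_rowDiffs (ref row : List String) (d : PySem.Set Nat) (x : Nat) :
    x ∈ pvRowDiffs ref row d ↔
      x ∈ d ∨ (x < row.length ∧ row.getD x "" ≠ ref.getD x "") := by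
  unfold pvRowDiffs
  rw [pv_mem_foldl_add_if (List.range row.length)
        (fun i => row.getD i "" ≠ ref.getD i "") (fun i => i) d x]
  simp [List.mem_range]

-- membership in B's differing set
theorem pv_mem_diffs (ref : List String) (rest : List (List String)) (s : PySem.Set Nat) (x : Nat) :
    x ∈ rest.foldl (fun d row => pvRowDiffs ref row d) s ↔
      x ∈ s ∨ ∃ row ∈ rest, x < row.length ∧ row.getD x "" ≠ ref.getD x "" := by
  induction rest generalizing s with
  | nil => simp
  | cons r rest ih =>
    simp only [List.foldl_cons, ih, pv_mem_rowDiffs, List.mem_cons]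
    constructor
    · rintro ((h|⟨h1,h2⟩)|⟨row,hrow,hx⟩)
      · exact Or.inl h
      · exact Or.inr ⟨r, Or.inl rfl, h1, h2⟩
      · exact Or.inr ⟨row, Or.inr hrow, hx⟩
    · rintro (h|⟨row,(rfl|hrow),hx⟩)
      · exact Or.inl (Or.inl h)
      · exact Or.inl (Or.inr hx)
      · exact Or.inr ⟨row, hrow, hx⟩

-- ===== VERDICT (by name: the statement is the Claim_ definition above) =====
theorem build_combined_pattern_py_spec : Claim_equal_build_combined_pattern_py := by
  intro xs _ hpre
  unfold Spec_build_combined_pattern_py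
  obtain ⟨hne, hlen0⟩ := hpre
  by_cases h1 : xs.length == 1
  · simp [build_combined_pattern_py, build_combined_pattern_py_alt, h1]
  · obtain ⟨h, t, rfl⟩ : ∃ h t, xs = h :: t := by
      cases xs with
      | nil => exact absurd rfl hne
      | cons h t => exact ⟨h, t, rfl⟩
    have hlen : ∀ p ∈ t, (pvSplit p).length = (pvSplit h).length := by
      intro p hp
      simpa using hlen0 p (List.mem_cons_of_mem _ hp)
    have hconst : ∀ y ∈ List.map List.length (List.map pvSplit t), y = (pvSplit h).length := by
      intro y hy
      simp only [List.map_map, List.mem_map, Function.comp] at hy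
      obtain ⟨p, hp, rfl⟩ := hy
      exact hlen p hp
    have hzip : pvZipStar (pvSplit h :: List.map pvSplit t)
        = (List.range (pvSplit h).length).map
            (fun i => (pvSplit h :: List.map pvSplit t).map (fun r => r.getD i "")) := by
      unfold pvZipStar
      rw [List.map_cons, pv_min?_const _ _ hconst]
    simp only [build_combined_pattern_py, build_combined_pattern_py_alt, h1,
      Bool.false_eq_true, if_false, List.map_cons, List.headD_cons, List.tail_cons,
      pv_ofList_const _ _ hconst, List.length_singleton, hzip]
    rw [if_neg ?hca]
    case hca => omega
    rw [if_neg ?hcb]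
    case hcb =>
      rw [List.any_eq_true]
      rintro ⟨s, hs, hd⟩
      rw [List.mem_map] at hs
      obtain ⟨p, hp, rfl⟩ := hs
      rw [decide_eq_true_eq] at hd
      exact hd (hlen p hp)
    rw [pv_foldl_append_ite _ (fun segments => (List.length (PySem.Set.ofList segments) == 1) = true)
          (fun segments => segments.headD "") (fun _ => "*") []]
    rw [List.nil_append, List.map_map]
    refine congrArg (PySem.Str.join "/") (List.map_congr_left ?_)
    intro i hi
    rw [List.mem_range] at hi
    simp only [Function.comp, List.headD_cons]
    have hcond : (List.length (PySem.Set.ofList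
          ((pvSplit h).getD i "" :: (List.map pvSplit t).map (fun r => r.getD i ""))) == 1) = true
        ↔ ∀ p ∈ t, (pvSplit p).getD i "" = (pvSplit h).getD i "" := by
      rw [beq_iff_eq, pv_ofList_len_one]
      simp only [List.map_map, List.mem_map, Function.comp, forall_exists_index]
      constructor
      · intro hy p hp; exact hy _ p ⟨hp, rfl⟩
      · rintro hy y p ⟨hp, rfl⟩; exact hy p hp
    have hmem : ((List.map pvSplit t).foldl (fun d row => pvRowDiffs (pvSplit h) row d)
          PySem.Set.empty).contains i = true
        ↔ ∃ p ∈ t, (pvSplit p).getD i "" ≠ (pvSplit h).getD i "" := by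
      rw [PySem.Set.contains_iff, pv_mem_diffs]
      simp only [PySem.Set.empty, List.not_mem_nil, false_or, List.mem_map]
      constructor
      · rintro ⟨row, ⟨p, hp, rfl⟩, _, hd⟩
        exact ⟨p, hp, hd⟩
      · rintro ⟨p, hp, hd⟩
        exact ⟨pvSplit p, ⟨p, hp, rfl⟩, by rw [hlen p hp]; exact hi, hd⟩
    by_cases hall : ∀ p ∈ t, (pvSplit p).getD i "" = (pvSplit h).getD i ""
    · rw [if_pos (hcond.mpr hall)]
      rw [if_neg ?_]
      intro hc
      obtain ⟨p, hp, hd⟩ := hmem.mp hc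
      exact hd (hall p hp)
    · rw [if_neg (fun hc => hall (hcond.mp hc))]
      rw [if_pos ?_]
      rcases not_forall.mp hall with ⟨p, hpd⟩
      rcases Classical.not_imp.mp hpd with ⟨hp, hd⟩
      exact hmem.mpr ⟨p, hp, hd⟩
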